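-- pv_equiv track=rewrite | github.com/tmacro-archive/backhaul | backhaul/util/iter.py | smart_range
-- ===== SOURCE A (Python) =====
-- def smart_range(start, stop, reverse=False):
-- 	'''Correctly handles iterating over ranges in
-- 	either direction including negative numbers'''
-- 	direction = 1 if stop > start else -1
-- 	diff = abs(start - stop) if start > stop else abs(stop - start)
-- 	if reverse:
-- 		direction *= -1 # Reverse our iteration direction
-- 		start = stop + direction # Shift by 1 to maintain start/end
-- 	for x in range(diff):
-- 		yield int(x * direction + start)
-- ===== SOURCE B (Python) =====
-- def smart_range(start, stop, reverse=False):
--     '''Iterate the range by walking back from stop toward start, collecting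
--     the elements back-to-front, then reversing once for the forward direction.'''
--     step = 1 if stop > start else -1
--     out = []
--     x = stop
--     while x != start:
--         x -= step
--         out.append(x)
--     if not reverse:
--         out.reverse()
--     yield from out
-- ===== Notes on version B (the rewrite author's own statement) =====
-- stated objective: alternative
-- what changed: B walks backwards from stop toward start with a while loop, accumulating the output back-to-front, and does one final reverse for the forward direction, instead of A's index loop with direction/diff/offset arithmetic and the start-shifting reverse branch.
import Mathlib
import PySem

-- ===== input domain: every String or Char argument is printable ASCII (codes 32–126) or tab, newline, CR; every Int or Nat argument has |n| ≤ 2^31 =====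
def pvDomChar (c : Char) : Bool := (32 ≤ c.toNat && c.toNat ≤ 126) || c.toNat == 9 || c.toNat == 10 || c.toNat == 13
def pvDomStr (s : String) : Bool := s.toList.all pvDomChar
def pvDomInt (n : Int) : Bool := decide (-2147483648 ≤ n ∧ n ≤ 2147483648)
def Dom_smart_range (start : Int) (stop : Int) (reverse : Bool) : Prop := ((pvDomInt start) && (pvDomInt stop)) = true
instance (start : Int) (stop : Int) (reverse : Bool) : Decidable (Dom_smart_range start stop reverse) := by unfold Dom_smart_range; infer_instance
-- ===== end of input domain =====

-- B walks backwards from stop toward start with an accumulator (building the output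
-- back-to-front, reversing once for the forward direction) instead of A's index loop
-- with direction/diff/offset arithmetic (objective: alternative).


-- ===== PORT A =====
-- literal transliteration of A (generator → list of yielded values)
def smart_range (start : Int) (stop : Int) (reverse : Bool) : List Int :=
  let direction : Int := if stop > start then 1 else -1
  let diff : Int := if start > stop then |start - stop| else |stop - start|
  let direction := if reverse then direction * -1 else direction
  let start := if reverse then stop + direction else start
  (PySem.List.pyRange 0 diff 1).map (fun x => x * direction + start)

-- ===== PORT B =====
-- the while loop of Source B, fuel = exact number of iterations (the fuel only makes the
-- same computation total; the loop runs exactly |stop - start| times)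
def smartLoop (fuel : Nat) (start step x : Int) (acc : List Int) : List Int :=
  match fuel with
  | 0 => acc
  | n + 1 => if x = start then acc else smartLoop n start step (x - step) (acc ++ [x - step])

-- literal transliteration of B: walk back from stop, collect back-to-front, reverse if forward
def smart_range_alt (start : Int) (stop : Int) (reverse : Bool) : List Int :=
  let step : Int := if stop > start then 1 else -1
  let out := smartLoop (|stop - start|).toNat start step stop []
  if !reverse then out.reverse else out

-- ===== PRECONDITION & SPEC =====
def Spec_smart_range (start : Int) (stop : Int) (reverse : Bool) (out : List Int) : Prop := out = smart_range_alt start stop reverse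
instance (start : Int) (stop : Int) (reverse : Bool) (out : List Int) : Decidable (Spec_smart_range start stop reverse out) := by unfold Spec_smart_range; infer_instance

-- ===== CLAIM (what is proved, stated in full; the proofs are below) =====
def Claim_equal_smart_range : Prop := ∀ (start : Int) (stop : Int) (reverse : Bool), Dom_smart_range start stop reverse → Spec_smart_range start stop reverse (smart_range start stop reverse)

-- ===== LEMMAS AND PROOFS =====

-- the loop, run from x = start + step·n with step = ±1, returns the reversed forward list
theorem smartLoop_spec (step : Int) (hs : step = 1 ∨ step = -1) :
    ∀ (n : Nat) (start : Int) (acc : List Int),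
      smartLoop n start step (start + step * n) acc
        = acc ++ ((List.range n).map (fun k : Nat => start + step * k)).reverse := by
  intro n
  induction n with
  | zero => intro start acc; simp [smartLoop]
  | succ n ih =>
      intro start acc
      have hne : start + step * (n + 1 : Nat) ≠ start := by
        rcases hs with h | h <;> subst h <;> push_cast <;> omega
      rw [smartLoop, if_neg hne]
      have hx : start + step * ((n : Nat) + 1 : Nat) - step = start + step * n := by push_cast; ring
      rw [hx, ih start (acc ++ [start + step * n])]
      simp [List.range_succ, List.append_assoc]

-- reverse of a map over range, elementwise
theorem rev_map_range (n : Nat) (f : Nat → Int) :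
    ((List.range n).map f).reverse = (List.range n).map (fun i => f (n - 1 - i)) := by
  apply List.ext_getElem
  · simp
  · intro i h1 h2
    simp only [List.length_reverse, List.length_map, List.length_range] at h1
    simp [List.getElem_reverse, List.getElem_map, List.getElem_range]

theorem smart_range_eq_alt (start stop : Int) (reverse : Bool) :
    smart_range start stop reverse = smart_range_alt start stop reverse := by
  simp only [smart_range, smart_range_alt]
  rcases lt_trichotomy start stop with h | h | h
  · -- ascending: step = 1, the loop runs stop - start times
    rw [if_pos h, if_neg (by omega : ¬ start > stop), abs_of_pos (by omega : (0:Int) < stop - start)]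
    have hstop : start + 1 * (((stop - start).toNat : Int)) = stop := by omega
    have hl := smartLoop_spec 1 (Or.inl rfl) (stop - start).toNat start []
    rw [hstop] at hl
    cases reverse with
    | false =>
        simp only [Bool.not_false, Bool.false_eq_true, if_true, if_false, hl, List.nil_append,
          List.reverse_reverse, PySem.List.pyRange_one, Int.sub_zero, List.map_map]
        apply List.map_congr_left; intro k _; simp; omega
    | true =>
        simp only [Bool.not_true, Bool.false_eq_true, if_true, if_false, hl, List.nil_append,
          PySem.List.pyRange_one, Int.sub_zero, List.map_map]
        rw [rev_map_range]
        apply List.map_congr_left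
        intro k hk
        simp only [List.mem_range] at hk
        simp; omega
  · -- start = stop: both empty
    subst h
    simp [smartLoop]
  · -- descending: step = -1, the loop runs start - stop times
    rw [abs_sub_comm stop start, if_neg (by omega : ¬ stop > start), if_pos h,
      abs_of_pos (by omega : (0:Int) < start - stop)]
    have hstop : start + (-1) * (((start - stop).toNat : Int)) = stop := by omega
    have hl := smartLoop_spec (-1) (Or.inr rfl) (start - stop).toNat start []
    rw [hstop] at hl
    cases reverse with
    | false =>
        simp only [Bool.not_false, Bool.false_eq_true, if_true, if_false, hl, List.nil_append,
          List.reverse_reverse, PySem.List.pyRange_one, Int.sub_zero, List.map_map]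
        apply List.map_congr_left; intro k _; simp; omega
    | true =>
        simp only [Bool.not_true, Bool.false_eq_true, if_true, if_false, hl, List.nil_append,
          PySem.List.pyRange_one, Int.sub_zero, List.map_map]
        rw [rev_map_range]
        apply List.map_congr_left
        intro k hk
        simp only [List.mem_range] at hk
        simp; omega

-- ===== VERDICT (by name: the statement is the Claim_ definition above) =====
theorem smart_range_spec : Claim_equal_smart_range := by
  intro start stop reverse _
  exact smart_range_eq_alt start stop reverse
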